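-- pv_equiv track=rewrite | github.com/LYNQUATIQ/AoC | src/aoc/2019/day_12.py | x_period
-- ===== SOURCE A (Python) =====
-- from itertools import combinations
--
-- def x_period(positions):
--     velocity = [0] * len(positions)
--     original_positions = positions.copy()
--     original_velocity = velocity.copy()
--     pairs = list(combinations(range(len(positions)), 2))
--     t = 0
--     while True:
--         t += 1
--         for i, j in pairs:
--             x1, x2 = positions[i], positions[j]
--             dx = (x1 < x2) - (x1 > x2)
--             velocity[i] += dx
--             velocity[j] -= dx
--         positions = [p + v for p, v in zip(positions, velocity)]
--         if velocity == original_velocity and positions == original_positions: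
--             break
--     return t
-- ===== SOURCE B (Python) =====
-- def x_period(positions):
--     n = len(positions)
--     prev = list(positions)
--     cur = list(positions)
--     t = 0
--     while True:
--         t += 1
--         # acceleration table: sort the positions, sweep the runs of equal
--         # values once; a moon at value v feels (#greater - #less) = (n - end) - start
--         s = sorted(cur)
--         acc = {}
--         i = 0
--         while i < n:
--             j = i
--             while j < n and s[j] == s[i]:
--                 j += 1
--             acc[s[i]] = (n - j) - i
--             i = j
--         # velocity-free second-order step: p' = 2p - p_prev + a
--         nxt = [2 * c - p + acc[c] for p, c in zip(prev, cur)]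
--         if nxt == cur and nxt == positions:
--             return t
--         prev, cur = cur, nxt
-- ===== Notes on version B (the rewrite author's own statement) =====
-- stated objective: alternative
-- what changed: B drops the velocity list entirely, iterating the second-order recurrence p' = 2p - p_prev + a on a two-position window, and computes all accelerations per step by sorting the positions and sweeping the runs of equal values once into a value->acceleration table, instead of A's all-pairs +/-sign updates to a velocity vector.
import Mathlib
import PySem

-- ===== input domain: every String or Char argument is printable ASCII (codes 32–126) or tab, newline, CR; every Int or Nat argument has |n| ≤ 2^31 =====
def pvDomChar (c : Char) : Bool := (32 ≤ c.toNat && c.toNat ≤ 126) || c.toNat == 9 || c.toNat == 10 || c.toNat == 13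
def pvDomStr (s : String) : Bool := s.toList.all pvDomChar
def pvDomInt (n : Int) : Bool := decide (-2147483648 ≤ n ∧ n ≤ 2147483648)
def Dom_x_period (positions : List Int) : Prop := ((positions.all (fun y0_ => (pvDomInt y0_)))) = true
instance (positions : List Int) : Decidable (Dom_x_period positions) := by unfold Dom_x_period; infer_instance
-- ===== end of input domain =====

-- B is an alternative algorithm: it drops the velocity list (second-order recurrence
-- p' = 2p - p_prev + a on a two-position window) and computes accelerations per step by
-- sorting the positions and sweeping runs of equal values once into a value→acceleration
-- table. Both loops run until the state repeats; the shared fuel bound only makes the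
-- while-True loop total in Lean.

def pvFuel : Nat := 4611686018427387904

-- ===== PORT A =====
-- (x1 < x2) - (x1 > x2)
def pySign (x1 x2 : Int) : Int := (if x1 < x2 then (1:Int) else 0) - (if x1 > x2 then (1:Int) else 0)

-- list(combinations(range(n), 2)) in Python's order
def combi2 : List Nat → List (Nat × Nat)
  | [] => []
  | i :: rest => rest.map (fun j => (i, j)) ++ combi2 rest

-- velocity[i] += d (in-place update, transliterated functionally)
def addAt : List Int → Nat → Int → List Int
  | [], _, _ => []
  | x :: xs, 0, d => (x + d) :: xs
  | x :: xs, Nat.succ n, d => x :: addAt xs n d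

-- body of "for i, j in pairs" for one pair
def stepA (pos : List Int) (vel : List Int) (ij : Nat × Nat) : List Int :=
  let x1 := pos.getD ij.1 0
  let x2 := pos.getD ij.2 0
  let dx := pySign x1 x2
  addAt (addAt vel ij.1 dx) ij.2 (-dx)

-- the while-True loop of A (fuel only makes it total; it breaks exactly as Python does)
def loopA (pairs : List (Nat × Nat)) (origPos origVel : List Int) :
    Nat → List Int → List Int → Int → Int
  | 0, _, _, t => t
  | fuel+1, pos, vel, t =>
    let vel' := pairs.foldl (stepA pos) vel
    let pos' := List.zipWith (fun p v => p + v) pos vel'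
    if vel' = origVel ∧ pos' = origPos then t + 1
    else loopA pairs origPos origVel fuel pos' vel' (t + 1)

def x_period (positions : List Int) : Int :=
  let velocity : List Int := List.replicate positions.length 0
  let pairs := combi2 (List.range positions.length)
  loopA pairs positions velocity pvFuel positions velocity 0

-- ===== PORT B =====
-- the inner "while i < n: … while j < n and s[j] == s[i]: j += 1 …" run sweep, as
-- recursion on the sorted list: each run of a value v inserts acc[v] = (n - j) - i
def sweepB (n : Nat) : List Int → Nat → PySem.Dict Int Int → PySem.Dict Int Int
  | [], _, acc => acc
  | v :: tl, i, acc =>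
    let m := 1 + (tl.takeWhile (fun q => q == v)).length
    sweepB n (tl.dropWhile (fun q => q == v)) (i + m)
      (acc.insert v (((n : Int) - ((i + m : Nat) : Int)) - (i : Int)))
  termination_by s => s.length
  decreasing_by
    exact Nat.lt_succ_of_le (List.length_dropWhile_le _ _)

-- s = sorted(cur); acc = {value: (#greater - #less)} built by the sweep
def accTable (cur : List Int) : PySem.Dict Int Int :=
  sweepB cur.length (PySem.List.sorted cur (fun x => x) false) 0 PySem.Dict.empty

-- the while-True loop of B over the two-position window (prev, cur)
def loopB (orig : List Int) : Nat → List Int → List Int → Int → Int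
  | 0, _, _, t => t
  | fuel+1, prev, cur, t =>
    let acc := accTable cur
    -- acc[c]: the key c is always present (c ∈ cur); getD's default is never taken
    let nxt := (prev.zip cur).map (fun pc => 2 * pc.2 - pc.1 + acc.getD pc.2 0)
    if nxt = cur ∧ nxt = orig then t + 1
    else loopB orig fuel cur nxt (t + 1)

def x_period_alt (positions : List Int) : Int :=
  loopB positions pvFuel positions positions 0

-- ===== PRECONDITION & SPEC =====
def Spec_x_period (positions : List Int) (out : Int) : Prop := out = x_period_alt positions
instance (positions : List Int) (out : Int) : Decidable (Spec_x_period positions out) := by unfold Spec_x_period; infer_instance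

-- ===== CLAIM (what is proved, stated in full; the proofs are below) =====
def Claim_equal_x_period : Prop := ∀ (positions : List Int), Dom_x_period positions → Spec_x_period positions (x_period positions)

-- ===== LEMMAS AND PROOFS =====

-- counting formulation of one gravity pass: vel[i] + #greater - #less (proof-only)
def gravC (pos vel : List Int) : List Int :=
  (pos.zip vel).map (fun pv =>
    pv.2 + ((pos.countP fun q => decide (pv.1 < q) : Nat) : Int)
         - ((pos.countP fun q => decide (q < pv.1) : Nat) : Int))

-- sign of pos[j] - pos[k], as A computes it
def sgn (pos : List Int) (k j : Nat) : Int := pySign (pos.getD k 0) (pos.getD j 0)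

-- net change one pair (i,j) makes to velocity[k]
def contrib (pos : List Int) (k : Nat) (ij : Nat × Nat) : Int :=
  (if ij.1 = k then sgn pos k ij.2 else 0) + (if ij.2 = k then sgn pos k ij.1 else 0)

theorem pySign_self (x : Int) : pySign x x = 0 := by
  unfold pySign; split_ifs <;> omega

theorem pySign_swap (a b : Int) : pySign a b = -pySign b a := by
  unfold pySign; split_ifs <;> omega

theorem addAt_length (l : List Int) (i : Nat) (d : Int) : (addAt l i d).length = l.length := by
  induction l generalizing i with
  | nil => rfl
  | cons x xs ih => cases i <;> simp [addAt, ih]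

theorem addAt_getD (l : List Int) (i : Nat) (d : Int) (k : Nat) :
    (addAt l i d).getD k 0 = l.getD k 0 + (if i = k ∧ k < l.length then d else 0) := by
  induction l generalizing i k with
  | nil => simp [addAt]
  | cons x xs ih =>
    cases i with
    | zero =>
      cases k with
      | zero => simp [addAt]
      | succ k' => simp [addAt]
    | succ i' =>
      cases k with
      | zero => simp [addAt]
      | succ k' =>
        simp only [addAt, List.getD_cons_succ, ih, List.length_cons]
        congr 1
        by_cases h : i' = k' ∧ k' < xs.length
        · rw [if_pos h, if_pos ⟨by omega, by omega⟩]
        · rw [if_neg h, if_neg (by omega)]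

theorem stepA_length (pos vel : List Int) (ij : Nat × Nat) :
    (stepA pos vel ij).length = vel.length := by
  simp [stepA, addAt_length]

theorem foldl_stepA_length (L : List (Nat × Nat)) (pos vel : List Int) :
    (L.foldl (stepA pos) vel).length = vel.length := by
  induction L generalizing vel with
  | nil => rfl
  | cons ij L ih => simp [List.foldl_cons, ih, stepA_length]

theorem stepA_getD (pos vel : List Int) (ij : Nat × Nat)
    (hi : ij.1 < vel.length) (hj : ij.2 < vel.length) (k : Nat) :
    (stepA pos vel ij).getD k 0 = vel.getD k 0 + contrib pos k ij := by
  simp only [stepA, contrib, addAt_getD, addAt_length, sgn]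
  have hswap := pySign_swap (pos.getD ij.1 0) (pos.getD ij.2 0)
  by_cases h1 : ij.1 = k <;> by_cases h2 : ij.2 = k
  · rw [if_pos ⟨h1, by omega⟩, if_pos ⟨h2, by omega⟩, if_pos h1, if_pos h2]
    subst h1; rw [← h2]; rw [pySign_self]; ring
  · rw [if_pos ⟨h1, by omega⟩, if_neg (by omega), if_pos h1, if_neg h2]
    subst h1; ring
  · rw [if_neg (by omega), if_pos ⟨h2, by omega⟩, if_neg h1, if_pos h2]
    subst h2; omega
  · rw [if_neg (by omega), if_neg (by omega), if_neg h1, if_neg h2]; ring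

theorem foldl_contrib (L : List (Nat × Nat)) (pos : List Int) :
    ∀ (vel : List Int) (k : Nat),
    (∀ ij ∈ L, ij.1 < vel.length ∧ ij.2 < vel.length) →
    (L.foldl (stepA pos) vel).getD k 0 = vel.getD k 0 + (L.map (contrib pos k)).sum := by
  induction L with
  | nil => intro vel k _; simp
  | cons ij L ih =>
    intro vel k h
    have hij := h ij (by simp)
    have hL : ∀ p ∈ L, p.1 < (stepA pos vel ij).length ∧ p.2 < (stepA pos vel ij).length := by
      intro p hp; rw [stepA_length]; exact h p (by simp [hp])
    simp only [List.foldl_cons, List.map_cons, List.sum_cons]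
    rw [ih (stepA pos vel ij) k hL, stepA_getD pos vel ij hij.1 hij.2 k]
    ring

theorem combi2_mem (il : List Nat) (ij : Nat × Nat) (h : ij ∈ combi2 il) :
    ij.1 ∈ il ∧ ij.2 ∈ il := by
  induction il with
  | nil => simp [combi2] at h
  | cons a rest ih =>
    simp only [combi2, List.mem_append, List.mem_map] at h
    rcases h with ⟨j, hj, hji⟩ | h
    · subst hji; exact ⟨by simp, by simp [hj]⟩
    · exact ⟨by simp [(ih h).1], by simp [(ih h).2]⟩

theorem contrib_sum_notmem (il : List Nat) (pos : List Int) (k : Nat) (h : k ∉ il) :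
    ((combi2 il).map (contrib pos k)).sum = 0 := by
  apply List.sum_eq_zero
  intro x hx
  simp only [List.mem_map] at hx
  obtain ⟨ij, hij, hx⟩ := hx
  obtain ⟨h1, h2⟩ := combi2_mem il ij hij
  subst hx
  have e1 : ij.1 ≠ k := fun e => h (e ▸ h1)
  have e2 : ij.2 ≠ k := fun e => h (e ▸ h2)
  simp [contrib, e1, e2]

theorem sum_if_single (il : List Nat) (k : Nat) (c : Int) (hnd : il.Nodup) (hk : k ∈ il) :
    (il.map (fun j => if j = k then c else 0)).sum = c := by
  induction il with
  | nil => simp at hk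
  | cons a rest ih =>
    simp only [List.nodup_cons] at hnd
    simp only [List.map_cons, List.sum_cons]
    rcases List.mem_cons.mp hk with h | h
    · subst h
      rw [if_pos rfl]
      have : (rest.map (fun j => if j = k then c else 0)).sum = 0 := by
        apply List.sum_eq_zero
        intro x hx
        simp only [List.mem_map] at hx
        obtain ⟨j, hj, hx⟩ := hx
        have : j ≠ k := fun e => hnd.1 (e ▸ hj)
        simp [← hx, this]
      rw [this]; ring
    · have : a ≠ k := fun e => hnd.1 (e ▸ h)
      rw [if_neg this, ih hnd.2 h]; ring

theorem contrib_sum_mem (il : List Nat) (pos : List Int) (k : Nat)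
    (hnd : il.Nodup) (hk : k ∈ il) :
    ((combi2 il).map (contrib pos k)).sum = (il.map (fun j => sgn pos k j)).sum := by
  induction il with
  | nil => simp at hk
  | cons a rest ih =>
    simp only [List.nodup_cons] at hnd
    simp only [combi2, List.map_append, List.sum_append, List.map_map, List.map_cons,
      List.sum_cons]
    rcases List.mem_cons.mp hk with h | h
    · subst h
      have h1 : ((rest.map (contrib pos k ∘ fun j => (k, j)))).sum
          = (rest.map (fun j => sgn pos k j)).sum := by
        apply congrArg
        apply List.map_congr_left
        intro j hj
        have : j ≠ k := fun e => hnd.1 (e ▸ hj)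
        simp [contrib, this]
      rw [h1, contrib_sum_notmem rest pos k hnd.1, sgn, pySign_self]
      ring
    · have hak : a ≠ k := fun e => hnd.1 (e ▸ h)
      have h1 : ((rest.map (contrib pos k ∘ fun j => (a, j)))).sum = sgn pos k a := by
        have : (rest.map (contrib pos k ∘ fun j => (a, j)))
            = rest.map (fun j => if j = k then sgn pos k a else 0) := by
          apply List.map_congr_left
          intro j _
          simp [contrib, hak]
        rw [this, sum_if_single rest k (sgn pos k a) hnd.2 h]
      rw [h1]
      rw [ih hnd.2 h]

theorem map_range_getD (pos : List Int) (g : Int → Int) :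
    (List.range pos.length).map (fun j => g (pos.getD j 0)) = pos.map g := by
  apply List.ext_getElem
  · simp
  · intro i h1 h2
    have hi : i < pos.length := by simpa using h2
    simp only [List.getElem_map, List.getElem_range]
    rw [List.getD_eq_getElem pos 0 hi]

theorem sum_sgn_counts (pos : List Int) (p : Int) :
    (pos.map (fun q => pySign p q)).sum
      = ((pos.countP fun q => decide (p < q) : Nat) : Int)
      - ((pos.countP fun q => decide (q < p) : Nat) : Int) := by
  induction pos with
  | nil => simp
  | cons q pos ih =>
    simp only [List.map_cons, List.sum_cons, List.countP_cons, ih]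
    unfold pySign
    by_cases h1 : p < q <;> by_cases h2 : q < p <;>
      simp [h1, h2] <;> omega

theorem gravC_length (pos vel : List Int) (h : vel.length = pos.length) :
    (gravC pos vel).length = pos.length := by
  simp [gravC, h]

theorem gravC_getElem (pos vel : List Int) (h : vel.length = pos.length)
    (k : Nat) (hk : k < (gravC pos vel).length) :
    (gravC pos vel)[k] = vel.getD k 0
      + ((pos.countP fun q => decide (pos.getD k 0 < q) : Nat) : Int)
      - ((pos.countP fun q => decide (q < pos.getD k 0) : Nat) : Int) := by
  have hk' : k < pos.length := by rw [gravC_length pos vel h] at hk; exact hk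
  simp only [gravC, List.getElem_map, List.getElem_zip]
  rw [List.getD_eq_getElem vel 0 (by omega), List.getD_eq_getElem pos 0 hk']

theorem grav_eq (pos vel : List Int) (h : vel.length = pos.length) :
    (combi2 (List.range pos.length)).foldl (stepA pos) vel = gravC pos vel := by
  apply List.ext_getElem
  · rw [foldl_stepA_length, gravC_length pos vel h, h]
  · intro k h1 h2
    have hk : k < pos.length := by rw [foldl_stepA_length, h] at h1; exact h1
    have hbound : ∀ ij ∈ combi2 (List.range pos.length),
        ij.1 < vel.length ∧ ij.2 < vel.length := by
      intro ij hij
      obtain ⟨m1, m2⟩ := combi2_mem _ ij hij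
      rw [List.mem_range] at m1 m2
      omega
    rw [← List.getD_eq_getElem _ 0 h1,
      foldl_contrib (combi2 (List.range pos.length)) pos vel k hbound,
      contrib_sum_mem (List.range pos.length) pos k (List.nodup_range)
        (List.mem_range.mpr hk)]
    have : (List.range pos.length).map (fun j => sgn pos k j)
        = pos.map (fun q => pySign (pos.getD k 0) q) :=
      map_range_getD pos (fun q => pySign (pos.getD k 0) q)
    rw [this, sum_sgn_counts pos (pos.getD k 0), gravC_getElem pos vel h k h2]
    ring

-- === B-side: the sweep builds the counting table ===

theorem run_eq_v (v : Int) (tl : List Int) (y : Int)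
    (h : y ∈ tl.takeWhile (fun q => q == v)) : y = v := by
  have := List.mem_takeWhile_imp h
  simpa using this

theorem gt_of_mem_dropWhile_beq (v : Int) : ∀ (tl : List Int), tl.Pairwise (· ≤ ·) →
    (∀ y ∈ tl, v ≤ y) → ∀ y ∈ tl.dropWhile (fun q => q == v), v < y := by
  intro tl
  induction tl with
  | nil => intro _ _ y hy; simp at hy
  | cons a tl ih =>
    intro hpw hlb y hy
    rw [List.pairwise_cons] at hpw
    by_cases ha : a = v
    · rw [List.dropWhile_cons_of_pos (by simp [ha])] at hy
      exact ih hpw.2 (fun z hz => hlb z (by simp [hz])) y hy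
    · rw [List.dropWhile_cons_of_neg (by simp [ha])] at hy
      have hva : v < a := lt_of_le_of_ne (hlb a (by simp)) (fun e => ha e.symm)
      rcases List.mem_cons.mp hy with h | h
      · omega
      · exact lt_of_lt_of_le hva (hpw.1 y h)

theorem sweep_getD_notmem_aux (n : Nat) : ∀ (N : Nat) (s : List Int), s.length ≤ N →
    ∀ (i : Nat) (d : PySem.Dict Int Int) (x : Int), x ∉ s →
    (sweepB n s i d).getD x 0 = d.getD x 0 := by
  intro N
  induction N with
  | zero =>
    intro s hs i d x _
    rw [List.eq_nil_of_length_eq_zero (Nat.le_zero.mp hs)]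
    simp only [sweepB]
  | succ N ih =>
    intro s hs i d x hx
    cases s with
    | nil => simp only [sweepB]
    | cons v tl =>
      simp only [sweepB]
      have hxv : x ≠ v := fun e => hx (by simp [e])
      have hlen : (tl.dropWhile (fun q => q == v)).length ≤ N := by
        have := List.length_dropWhile_le (fun q => q == v) tl
        simp at hs; omega
      have hxr : x ∉ tl.dropWhile (fun q => q == v) := fun hm =>
        hx (by simp [List.mem_cons, (List.dropWhile_sublist _).mem hm])
      rw [ih _ hlen _ _ x hxr, PySem.Dict.getD_insert, if_neg hxv]

theorem sweep_getD_notmem (n : Nat) (s : List Int) (i : Nat) (d : PySem.Dict Int Int)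
    (x : Int) (hx : x ∉ s) : (sweepB n s i d).getD x 0 = d.getD x 0 :=
  sweep_getD_notmem_aux n s.length s le_rfl i d x hx

theorem sweep_getD_aux (n : Nat) : ∀ (N : Nat) (s : List Int), s.length ≤ N →
    s.Pairwise (· ≤ ·) → ∀ (i : Nat) (d : PySem.Dict Int Int) (x : Int), x ∈ s →
    (sweepB n s i d).getD x 0
      = ((n : Int) - ((i + s.countP (fun q => decide (q ≤ x)) : Nat) : Int))
        - ((i + s.countP (fun q => decide (q < x)) : Nat) : Int) := by
  intro N
  induction N with
  | zero =>
    intro s hs _ i d x hx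
    rw [List.eq_nil_of_length_eq_zero (Nat.le_zero.mp hs)] at hx
    simp at hx
  | succ N ih =>
    intro s hs hpw i d x hx
    cases s with
    | nil => simp at hx
    | cons v tl =>
      have hpc := List.pairwise_cons.mp hpw
      have hrest_gt : ∀ y ∈ tl.dropWhile (fun q => q == v), v < y :=
        gt_of_mem_dropWhile_beq v tl hpc.2 hpc.1
      have hsplit : tl.takeWhile (fun q => q == v) ++ tl.dropWhile (fun q => q == v) = tl :=
        List.takeWhile_append_dropWhile
      have hcnt : ∀ p : Int → Bool,
          (v :: tl).countP p
            = ((if p v then 1 else 0) + (if p v then (tl.takeWhile (fun q => q == v)).length else 0))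
              + (tl.dropWhile (fun q => q == v)).countP p := by
        intro p
        rw [List.countP_cons, ← hsplit, List.countP_append]
        have hrun : (tl.takeWhile (fun q => q == v)).countP p
            = if p v then (tl.takeWhile (fun q => q == v)).length else 0 := by
          by_cases hpv : p v
          · rw [if_pos hpv]
            exact List.countP_eq_length.mpr (fun y hy => (run_eq_v v tl y hy) ▸ hpv)
          · rw [if_neg hpv]
            exact List.countP_eq_zero.mpr (fun y hy => by
              rw [run_eq_v v tl y hy]; exact hpv)
        rw [hrun]
        by_cases hpv : p v
        · simp [hpv]
          omega
        · simp [hpv]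
      simp only [sweepB]
      have hlen : (tl.dropWhile (fun q => q == v)).length ≤ N := by
        have := List.length_dropWhile_le (fun q => q == v) tl
        simp at hs; omega
      by_cases hxv : x = v
      · subst hxv
        have hxr : x ∉ tl.dropWhile (fun q => q == x) := fun hm =>
          absurd rfl (ne_of_gt (hrest_gt x hm))
        rw [sweep_getD_notmem n _ _ _ x hxr, PySem.Dict.getD_insert, if_pos rfl]
        have h1 : (x :: tl).countP (fun q => decide (q ≤ x)) = 1 + (tl.takeWhile (fun q => q == x)).length := by
          rw [hcnt]
          have hz : (tl.dropWhile (fun q => q == x)).countP (fun q => decide (q ≤ x)) = 0 :=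
            List.countP_eq_zero.mpr (fun y hy => by simpa using not_le.mpr (hrest_gt y hy))
          simp [hz]
        have h2 : (x :: tl).countP (fun q => decide (q < x)) = 0 := by
          rw [hcnt]
          have hz : (tl.dropWhile (fun q => q == x)).countP (fun q => decide (q < x)) = 0 :=
            List.countP_eq_zero.mpr (fun y hy => by simpa using not_lt.mpr (le_of_lt (hrest_gt y hy)))
          simp [hz]
        rw [h1, h2]
        push_cast
        ring
      · have hxtl : x ∈ tl := by
          rcases List.mem_cons.mp hx with h | h
          · exact absurd h hxv
          · exact h
        have hxrest : x ∈ tl.dropWhile (fun q => q == v) := by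
          rcases (List.mem_append.mp (hsplit ▸ hxtl)) with h | h
          · exact absurd (run_eq_v v tl x h) hxv
          · exact h
        have hvx : v < x := hrest_gt x hxrest
        have hpw' : (tl.dropWhile (fun q => q == v)).Pairwise (· ≤ ·) :=
          hpc.2.sublist (List.dropWhile_sublist _)
        rw [ih _ hlen hpw' _ _ x hxrest]
        have h1 := hcnt (fun q => decide (q ≤ x))
        have h2 := hcnt (fun q => decide (q < x))
        simp only [if_pos (show decide (v ≤ x) = true by simpa using le_of_lt hvx)] at h1
        simp only [if_pos (show decide (v < x) = true by simpa using hvx)] at h2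
        rw [h1, h2]
        push_cast
        ring

theorem cnt_le_add_gt (x : Int) (l : List Int) :
    l.countP (fun q => decide (q ≤ x)) + l.countP (fun q => decide (x < q)) = l.length := by
  induction l with
  | nil => simp
  | cons a t ih =>
    by_cases h : a ≤ x
    · simp [h, not_lt.mpr h]
      omega
    · simp [h, not_le.mp h]
      omega

theorem accTable_getD (cur : List Int) (x : Int) (hx : x ∈ cur) :
    (accTable cur).getD x 0
      = ((cur.countP fun q => decide (x < q) : Nat) : Int)
        - ((cur.countP fun q => decide (q < x) : Nat) : Int) := by
  unfold accTable
  have hperm : (PySem.List.sorted cur (fun x => x) false).Perm cur :=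
    PySem.List.sorted_perm cur (fun x => x) false
  have hpw : (PySem.List.sorted cur (fun x => x) false).Pairwise (· ≤ ·) :=
    PySem.List.sorted_pairwise cur (fun x => x)
  have hxs : x ∈ PySem.List.sorted cur (fun x => x) false := hperm.mem_iff.mpr hx
  rw [sweep_getD_aux cur.length _ _ le_rfl hpw 0 _ x hxs]
  rw [hperm.countP_eq, hperm.countP_eq]
  have hsum := cnt_le_add_gt x cur
  push_cast
  omega

-- === the two loops in lockstep ===

theorem eq_iff_getD (l1 l2 : List Int) (h : l1.length = l2.length) :
    l1 = l2 ↔ ∀ k, l1.getD k 0 = l2.getD k 0 := by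
  constructor
  · intro he k; rw [he]
  · intro hk
    apply List.ext_getElem h
    intro k hk1 hk2
    have := hk k
    rwa [List.getD_eq_getElem l1 0 hk1, List.getD_eq_getElem l2 0 hk2] at this

theorem getD_zipWith_add (pos vel : List Int) (h : vel.length = pos.length) (k : Nat) :
    (List.zipWith (fun p v => p + v) pos vel).getD k 0 = pos.getD k 0 + vel.getD k 0 := by
  by_cases hk : k < pos.length
  · rw [List.getD_eq_getElem _ 0 (by simp [List.length_zipWith]; omega),
      List.getElem_zipWith, List.getD_eq_getElem pos 0 hk, List.getD_eq_getElem vel 0 (by omega)]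
  · rw [List.getD_eq_default _ _ (by simp [List.length_zipWith]; omega),
      List.getD_eq_default _ _ (by omega), List.getD_eq_default _ _ (by omega)]
    rfl

theorem nxt_eq (prev pos vel : List Int)
    (hpr : prev.length = pos.length) (hv : vel.length = pos.length)
    (hinv : ∀ k, vel.getD k 0 = pos.getD k 0 - prev.getD k 0) :
    (prev.zip pos).map (fun pc => 2 * pc.2 - pc.1 + (accTable pos).getD pc.2 0)
      = List.zipWith (fun p v => p + v) pos (gravC pos vel) := by
  apply List.ext_getElem
  · simp [List.length_zipWith, gravC_length pos vel hv, hpr]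
  · intro k h1 h2
    have hk : k < pos.length := by simpa [hpr] using h1
    rw [List.getElem_map, List.getElem_zip, List.getElem_zipWith,
      gravC_getElem pos vel hv k (by rwa [gravC_length pos vel hv])]
    have hmem : pos[k] ∈ pos := List.getElem_mem hk
    have hgd : pos.getD k 0 = pos[k] := List.getD_eq_getElem pos 0 hk
    rw [hgd, accTable_getD pos (pos[k]) hmem]
    have := hinv k
    rw [hgd, List.getD_eq_getElem prev 0 (by omega)] at this
    rw [this]
    ring

theorem loop_eq (orig : List Int) : ∀ (fuel : Nat) (pos prev vel : List Int) (t : Int),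
    pos.length = orig.length → prev.length = orig.length → vel.length = orig.length →
    (∀ k, vel.getD k 0 = pos.getD k 0 - prev.getD k 0) →
    loopA (combi2 (List.range orig.length)) orig (List.replicate orig.length 0)
      fuel pos vel t = loopB orig fuel prev pos t := by
  intro fuel
  induction fuel with
  | zero => intro pos prev vel t _ _ _ _; rfl
  | succ fuel ih =>
    intro pos prev vel t hp hpr hv hinv
    have hvp : vel.length = pos.length := by omega
    have hgr : (combi2 (List.range orig.length)).foldl (stepA pos) vel = gravC pos vel := by
      rw [← hp]; exact grav_eq pos vel hvp
    have hnxt : (prev.zip pos).map (fun pc => 2 * pc.2 - pc.1 + (accTable pos).getD pc.2 0)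
        = List.zipWith (fun p v => p + v) pos (gravC pos vel) :=
      nxt_eq prev pos vel (by omega) hvp hinv
    have hvl : (gravC pos vel).length = orig.length := by
      rw [gravC_length pos vel hvp]; omega
    have hpl : (List.zipWith (fun p v => p + v) pos (gravC pos vel)).length = orig.length := by
      simp [List.length_zipWith]; omega
    -- the stopping conditions agree
    have hrep : ∀ k, (List.replicate orig.length (0:Int)).getD k 0 = 0 := by
      intro k
      by_cases h : k < orig.length
      · rw [List.getD_eq_getElem _ _ (by simpa using h)]
        simp
      · rw [List.getD_eq_default _ _ (by simpa using h)]
    have hcond : (gravC pos vel = List.replicate orig.length 0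
          ∧ List.zipWith (fun p v => p + v) pos (gravC pos vel) = orig)
        ↔ ((prev.zip pos).map (fun pc => 2 * pc.2 - pc.1 + (accTable pos).getD pc.2 0) = pos
          ∧ (prev.zip pos).map (fun pc => 2 * pc.2 - pc.1 + (accTable pos).getD pc.2 0) = orig) := by
      rw [hnxt]
      constructor
      · rintro ⟨h0, horig⟩
        refine ⟨?_, horig⟩
        rw [eq_iff_getD _ _ (by rw [hpl]; omega)]
        intro k
        rw [getD_zipWith_add pos (gravC pos vel) (by omega) k]
        have h0k : (gravC pos vel).getD k 0 = 0 := by rw [h0]; exact hrep k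
        omega
      · rintro ⟨hpos, horig⟩
        refine ⟨?_, horig⟩
        rw [eq_iff_getD _ _ (by rw [hvl]; simp)]
        intro k
        rw [hrep k]
        have h1 := congrArg (fun l : List Int => l.getD k 0) hpos
        simp only at h1
        rw [getD_zipWith_add pos (gravC pos vel) (by omega) k] at h1
        omega
    rw [loopA, loopB]
    simp only [hgr]
    by_cases hc : (prev.zip pos).map (fun pc => 2 * pc.2 - pc.1 + (accTable pos).getD pc.2 0) = pos
        ∧ (prev.zip pos).map (fun pc => 2 * pc.2 - pc.1 + (accTable pos).getD pc.2 0) = orig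
    · rw [if_pos hc, if_pos (hcond.mpr hc)]
    · rw [if_neg hc, if_neg (fun h => hc (hcond.mp h))]
      rw [hnxt]
      apply ih _ pos (gravC pos vel) (t + 1) hpl hp hvl
      intro k
      rw [getD_zipWith_add pos (gravC pos vel) (by omega) k]
      ring

-- ===== VERDICT (by name: the statement is the Claim_ definition above) =====
theorem x_period_spec : Claim_equal_x_period := by
  intro positions _
  unfold Spec_x_period x_period x_period_alt
  have := loop_eq positions pvFuel positions positions
    (List.replicate positions.length 0) 0 rfl rfl (by simp)
    (by intro k; simp)
  simpa using this
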